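-- pv_equiv track=rewrite | github.com/Sathishr424/LeetcodeProblems | 3523-MakeArrayNon-decreasing/3523-MakeArrayNon-decreasing.py | maximumPossibleSize
-- ===== SOURCE A (Python) =====
-- from typing import List
--
-- def maximumPossibleSize(nums: List[int]) -> int:
--     n = len(nums)
--
--     stack = []
--
--     for num in nums[::-1]:
--         while stack and stack[-1] < num:
--             stack.pop()
--
--         stack.append(num)
--
--     return len(stack)
-- ===== SOURCE B (Python) =====
-- from typing import List
--
-- def maximumPossibleSize(nums: List[int]) -> int:
--     count = 0
--     running_max = None
--     for num in nums:
--         if running_max is None or num >= running_max: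
--             count += 1
--             running_max = num
--     return count
-- ===== Notes on version B (the rewrite author's own statement) =====
-- stated objective: simpler
-- what changed: Replaces the right-to-left monotonic stack (with its inner pop loop) by a single left-to-right pass keeping only a count and the running maximum.
import Mathlib
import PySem

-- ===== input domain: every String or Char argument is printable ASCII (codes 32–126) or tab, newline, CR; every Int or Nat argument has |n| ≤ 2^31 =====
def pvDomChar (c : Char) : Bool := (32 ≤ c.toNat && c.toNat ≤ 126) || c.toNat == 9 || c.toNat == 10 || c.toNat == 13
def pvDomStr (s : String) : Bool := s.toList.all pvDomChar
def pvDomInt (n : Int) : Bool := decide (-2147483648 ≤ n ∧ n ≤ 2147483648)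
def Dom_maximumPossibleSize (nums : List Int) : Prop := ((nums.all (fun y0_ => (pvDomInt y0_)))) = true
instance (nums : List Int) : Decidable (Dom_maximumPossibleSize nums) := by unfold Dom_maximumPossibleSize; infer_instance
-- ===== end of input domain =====

-- B replaces A's right-to-left monotonic stack by a single left-to-right pass
-- keeping only a count and the running maximum (simpler, O(1) extra memory).

-- ===== PORT A =====
-- Python's stack (append/pop at the end) is represented with the TOP at the list HEAD;
-- pvPopA is the `while stack and stack[-1] < num: stack.pop()` loop, step for step.
def pvPopA (stack : List Int) (num : Int) : List Int :=
  match stack with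
  | [] => []
  | top :: rest => if top < num then pvPopA rest num else top :: rest

def maximumPossibleSize (nums : List Int) : Int :=
  -- for num in nums[::-1]: pop-loop, then stack.append(num); return len(stack)
  ((nums.reverse.foldl (fun stack num => num :: pvPopA stack num) []).length : Int)

-- ===== PORT B =====
def maximumPossibleSize_alt (nums : List Int) : Int :=
  (nums.foldl
    (fun (st : Int × Option Int) num =>
      match st.2 with
      | none => (st.1 + 1, some num)
      | some m => if num ≥ m then (st.1 + 1, some num) else st)
    (0, none)).1

-- ===== PRECONDITION & SPEC =====
def Spec_maximumPossibleSize (nums : List Int) (out : Int) : Prop := out = maximumPossibleSize_alt nums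
instance (nums : List Int) (out : Int) : Decidable (Spec_maximumPossibleSize nums out) := by unfold Spec_maximumPossibleSize; infer_instance

-- ===== CLAIM (what is proved, stated in full; the proofs are below) =====
def Claim_equal_maximumPossibleSize : Prop := ∀ (nums : List Int), Dom_maximumPossibleSize nums → Spec_maximumPossibleSize nums (maximumPossibleSize nums)

-- ===== LEMMAS AND PROOFS =====

-- A's stack after the whole loop, as a recursion on the ORIGINAL list (head processed last).
def pvStackOf (nums : List Int) : List Int :=
  nums.reverse.foldl (fun stack num => num :: pvPopA stack num) []

theorem pvStackOf_cons (y : Int) (t : List Int) :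
    pvStackOf (y :: t) = y :: pvPopA (pvStackOf t) y := by
  simp [pvStackOf, List.foldl_append]

-- B's count over the tail, given the current running maximum m.
def pvG (m : Int) : List Int → Int
  | [] => 0
  | y :: t => if y ≥ m then 1 + pvG y t else pvG m t

theorem pvPopA_popA (s : List Int) (y m : Int) (h : y ≤ m) :
    pvPopA (pvPopA s y) m = pvPopA s m := by
  induction s with
  | nil => rfl
  | cons a s ih =>
    by_cases ha : a < y
    · have ham : a < m := lt_of_lt_of_le ha h
      simp [pvPopA, ha, ham, ih]
    · simp [pvPopA, ha]

theorem pvPopA_length (t : List Int) : ∀ m : Int,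
    ((pvPopA (pvStackOf t) m).length : Int) = pvG m t := by
  induction t with
  | nil => intro m; simp [pvStackOf, pvPopA, pvG]
  | cons y t ih =>
    intro m
    rw [pvStackOf_cons]
    by_cases h : y ≥ m
    · have : ¬ y < m := not_lt.mpr h
      simp only [pvPopA, if_neg this, pvG, if_pos h, List.length_cons]
      rw [← ih y]; push_cast; ring
    · have hy : y < m := lt_of_not_ge h
      simp only [pvPopA, if_pos hy, pvG, if_neg h]
      rw [pvPopA_popA _ _ _ (le_of_lt hy), ih m]

theorem pvAlt_foldl (t : List Int) : ∀ (c m : Int),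
    (t.foldl
      (fun (st : Int × Option Int) num =>
        match st.2 with
        | none => (st.1 + 1, some num)
        | some m => if num ≥ m then (st.1 + 1, some num) else st)
      (c, some m)).1 = c + pvG m t := by
  induction t with
  | nil => intro c m; simp [pvG]
  | cons y t ih =>
    intro c m
    by_cases h : y ≥ m
    · simp only [List.foldl_cons, pvG, if_pos h, ih]; ring
    · simp only [List.foldl_cons, pvG, if_neg h, ih]

-- ===== VERDICT (by name: the statement is the Claim_ definition above) =====
theorem maximumPossibleSize_spec : Claim_equal_maximumPossibleSize := by
  intro nums _
  unfold Spec_maximumPossibleSize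
  cases nums with
  | nil => rfl
  | cons y t =>
    show ((pvStackOf (y :: t)).length : Int) = _
    rw [pvStackOf_cons]
    simp only [maximumPossibleSize_alt, List.foldl_cons, List.length_cons]
    rw [pvAlt_foldl]
    rw [← pvPopA_length t y]
    push_cast; ring
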